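-- pv_equiv track=rewrite | github.com/A-nnonymous/warp | runtime/cp/network.py | strip_command_args
-- ===== SOURCE A (Python) =====
-- def strip_command_args(command: list[str], flags: set[str]) -> list[str]:
--     cleaned: list[str] = []
--     skip_next = False
--     for part in command:
--         if skip_next:
--             skip_next = False
--             continue
--         if part in flags:
--             skip_next = True
--             continue
--         cleaned.append(part)
--     return cleaned
-- ===== SOURCE B (Python) =====
-- def strip_command_args(command: list[str], flags: set[str]) -> list[str]:
--     # Repeatedly locate the next flag occurrence from position j and slice:
--     # keep the slice before the flag, jump past the flag and its following
--     # element, and continue searching from there.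
--     out: list[str] = []
--     j = 0
--     n = len(command)
--     while True:
--         k = next((k for k in range(j, n) if command[k] in flags), None)
--         if k is None:
--             out.extend(command[j:])
--             return out
--         out.extend(command[j:k])
--         j = k + 2
-- ===== Notes on version B (the rewrite author's own statement) =====
-- stated objective: alternative
-- what changed: Replaced A's per-element pass threading a skip_next boolean with a search-and-slice loop: from position j it searches for the next flag occurrence, appends the slice before it, jumps past the flag and its follower, and repeats.
import Mathlib
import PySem

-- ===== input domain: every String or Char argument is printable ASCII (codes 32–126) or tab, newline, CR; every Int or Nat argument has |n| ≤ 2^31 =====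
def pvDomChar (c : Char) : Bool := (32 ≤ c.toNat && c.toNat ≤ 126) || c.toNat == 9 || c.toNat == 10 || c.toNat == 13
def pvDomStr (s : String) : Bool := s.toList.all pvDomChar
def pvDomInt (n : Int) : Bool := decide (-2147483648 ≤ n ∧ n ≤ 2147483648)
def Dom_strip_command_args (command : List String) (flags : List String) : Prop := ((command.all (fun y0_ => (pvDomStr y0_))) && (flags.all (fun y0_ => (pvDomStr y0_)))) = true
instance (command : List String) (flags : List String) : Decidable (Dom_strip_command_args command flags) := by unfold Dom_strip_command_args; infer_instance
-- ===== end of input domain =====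

-- B replaces A's per-element skip_next state machine with a search-and-slice loop
-- (find first flag, keep the prefix, slice past flag+argument, repeat); same cost,
-- the objective is a genuinely different decomposition.

-- ===== PORT A =====
-- literal port of A: fold over command threading (cleaned, skip_next)
def strip_command_args (command : List String) (flags : List String) : List String :=
  (command.foldl (fun (st : List String × Bool) part =>
      if st.2 then (st.1, false)
      else if flags.contains part then (st.1, true)
      else (st.1 ++ [part], st.2)) ([], false)).1

-- ===== PORT B =====
-- port of B's while-loop: find the next flag index at/after position j, keep the
-- slice before it, jump past the flag and its follower, continue from there
def stripLoop (flags command : List String) (out : List String) (j : Nat) : List String :=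
  match h : (command.drop j).findIdx? (fun p => flags.contains p) with
  | none => out ++ command.drop j
  | some i => stripLoop flags command (out ++ (command.drop j).take i) (j + i + 2)
termination_by command.length - j
decreasing_by
  have hi : i < (command.drop j).length := List.findIdx?_eq_some_iff_findIdx_eq.mp h |>.1
  simp [List.length_drop] at hi
  omega

def strip_command_args_alt (command : List String) (flags : List String) : List String :=
  stripLoop flags command [] 0

-- ===== PRECONDITION & SPEC =====
def Spec_strip_command_args (command : List String) (flags : List String) (out : List String) : Prop := out = strip_command_args_alt command flags
instance (command : List String) (flags : List String) (out : List String) : Decidable (Spec_strip_command_args command flags out) := by unfold Spec_strip_command_args; infer_instance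

-- ===== CLAIM (what is proved, stated in full; the proofs are below) =====
def Claim_equal_strip_command_args : Prop := ∀ (command : List String) (flags : List String), Dom_strip_command_args command flags → Spec_strip_command_args command flags (strip_command_args command flags)

-- ===== LEMMAS AND PROOFS =====

-- reference recursion used only by the proofs (neither port unfolds to it)
def stripGo (flags : List String) : List String → List String
  | [] => []
  | part :: rest =>
    if flags.contains part then
      match rest with
      | [] => []
      | _ :: t => stripGo flags t
    else part :: stripGo flags rest

lemma strip_foldl_eq (flags : List String) :
    ∀ (cmd : List String) (acc : List String),
      (cmd.foldl (fun (st : List String × Bool) part =>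
        if st.2 then (st.1, false)
        else if flags.contains part then (st.1, true)
        else (st.1 ++ [part], st.2)) (acc, false)).1 = acc ++ stripGo flags cmd := by
  intro cmd
  induction cmd using stripGo.induct (flags := flags) with
  | case1 => intro acc; simp [stripGo]
  | case2 p hp =>
    intro acc
    have hp' : p ∈ flags := by simpa using hp
    simp [List.foldl, hp', stripGo]
  | case3 p hp x t ih =>
    intro acc
    have hp' : p ∈ flags := by simpa using hp
    simp [List.foldl, hp', stripGo]
    simp at ih
    exact ih acc
  | case4 p t hp ih =>
    intro acc
    have hp' : ¬ p ∈ flags := by simpa using hp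
    simp [List.foldl, hp']
    simp at ih
    rw [ih]
    conv_rhs => rw [stripGo.eq_def]
    simp [hp']

lemma stripGo_no_flag (flags : List String) (rest : List String)
    (h : rest.findIdx? (fun p => flags.contains p) = none) :
    stripGo flags rest = rest := by
  induction rest with
  | nil => simp [stripGo]
  | cons p t ih =>
    rw [List.findIdx?_cons] at h
    by_cases hp : p ∈ flags
    · simp [hp] at h
    · simp [hp] at h
      rw [stripGo.eq_def]
      simp [hp, ih (by simpa using h)]

lemma stripGo_flag (flags : List String) (rest : List String) (i : Nat)
    (h : rest.findIdx? (fun p => flags.contains p) = some i) :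
    stripGo flags rest = rest.take i ++ stripGo flags (rest.drop (i + 2)) := by
  induction rest generalizing i with
  | nil => simp at h
  | cons p t ih =>
    rw [List.findIdx?_cons] at h
    by_cases hp : p ∈ flags
    · simp [hp] at h
      subst h
      rw [stripGo.eq_def]
      cases t with
      | nil => simp [hp, stripGo]
      | cons x t' => simp [hp]
    · simp [hp] at h
      obtain ⟨j, hj, rfl⟩ := h
      rw [stripGo.eq_def]
      simp [hp, ih j (by simpa using hj)]

lemma stripLoop_eq (flags command : List String) (out : List String) (j : Nat) :
    stripLoop flags command out j = out ++ stripGo flags (command.drop j) := by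
  induction out, j using stripLoop.induct (flags := flags) (command := command) with
  | case1 out j h =>
    rw [stripLoop]
    split
    · simp [stripGo_no_flag flags (command.drop j) h]
    · rename_i i heq; rw [h] at heq; cases heq
  | case2 out j i h ih =>
    rw [stripLoop]
    split
    · rename_i heq; rw [h] at heq; cases heq
    · rename_i i' heq
      rw [h] at heq; cases heq
      rw [ih, stripGo_flag flags (command.drop j) i h, List.append_assoc]
      have : command.drop (j + i + 2) = (command.drop j).drop (i + 2) := by
        rw [List.drop_drop]; ring_nf
      rw [this]

-- ===== VERDICT (by name: the statement is the Claim_ definition above) =====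
theorem strip_command_args_spec : Claim_equal_strip_command_args := by
  intro command flags _
  unfold Spec_strip_command_args strip_command_args strip_command_args_alt
  rw [stripLoop_eq]
  simpa using strip_foldl_eq flags command []
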